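-- pv_equiv track=rewrite | github.com/DSGWJQ/Feagent | src/domain/entities/scheduled_workflow.py | _convert_month_abbr
-- ===== SOURCE A (Python) =====
-- def _convert_month_abbr(month_field: str) -> str:
--     """转换月份缩写为数字
--
--     参数：
--         month_field: 月份字段
--
--     返回：
--         转换后的字段
--     """
--     month_map = {
--         "JAN": "1",
--         "FEB": "2",
--         "MAR": "3",
--         "APR": "4",
--         "MAY": "5",
--         "JUN": "6",
--         "JUL": "7",
--         "AUG": "8",
--         "SEP": "9",
--         "OCT": "10",
--         "NOV": "11",
--         "DEC": "12",
--     }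
--
--     result = month_field.upper()
--     for abbr, num in month_map.items():
--         result = result.replace(abbr, num)
--
--     return result
-- ===== SOURCE B (Python) =====
-- def _convert_month_abbr(month_field: str) -> str:
--     """Single left-to-right scan: at each position try the 3-char window as a
--     month abbreviation, instead of 12 sequential full-string replace passes."""
--     month_map = {
--         "JAN": "1",
--         "FEB": "2",
--         "MAR": "3",
--         "APR": "4",
--         "MAY": "5",
--         "JUN": "6",
--         "JUL": "7",
--         "AUG": "8",
--         "SEP": "9",
--         "OCT": "10",
--         "NOV": "11",
--         "DEC": "12",
--     }
--     s = month_field.upper()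
--     out = []
--     i = 0
--     n = len(s)
--     while i < n:
--         num = month_map.get(s[i:i + 3])
--         if num is not None:
--             out.append(num)
--             i += 3
--         else:
--             out.append(s[i])
--             i += 1
--     return "".join(out)
-- ===== Notes on version B (the rewrite author's own statement) =====
-- stated objective: alternative
-- what changed: A makes 12 sequential full-string replace passes (one per month abbreviation); B makes a single left-to-right scan that tries the 3-character window at each position against the month map, proved equal because the abbreviations are equal-length, letters-only, non-overlapping in dictionary order, and replaced by digits.
import Mathlib
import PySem

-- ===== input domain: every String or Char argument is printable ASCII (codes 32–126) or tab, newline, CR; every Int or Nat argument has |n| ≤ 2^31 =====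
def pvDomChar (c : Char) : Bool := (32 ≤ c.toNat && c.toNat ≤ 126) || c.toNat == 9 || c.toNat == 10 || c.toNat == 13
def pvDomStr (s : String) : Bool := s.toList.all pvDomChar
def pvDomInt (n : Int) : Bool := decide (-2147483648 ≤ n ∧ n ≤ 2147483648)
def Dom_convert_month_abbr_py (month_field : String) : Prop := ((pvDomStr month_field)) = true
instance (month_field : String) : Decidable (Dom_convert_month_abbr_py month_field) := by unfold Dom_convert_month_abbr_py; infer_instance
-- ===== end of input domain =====

-- B replaces A's 12 sequential full-string replace passes by ONE left-to-right scan that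
-- tries the 3-character window at each position against the month map (alternative
-- decomposition, same exact return value).

-- ===== PORT A =====
-- the month_map dict of A, in insertion order
def monthMapA : List (String × String) :=
  [("JAN", "1"), ("FEB", "2"), ("MAR", "3"), ("APR", "4"), ("MAY", "5"), ("JUN", "6"),
   ("JUL", "7"), ("AUG", "8"), ("SEP", "9"), ("OCT", "10"), ("NOV", "11"), ("DEC", "12")]

-- A: result = month_field.upper(); for abbr, num in month_map.items(): result = result.replace(abbr, num)
def convert_month_abbr_py (month_field : String) : String :=
  monthMapA.foldl (fun result p => PySem.Str.replace result p.1 p.2) (PySem.Str.upper month_field)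

-- ===== PORT B =====
-- the same map, on the character-list side (Source B looks 3-character windows up in this dict)
def monthPairs : List (List Char × List Char) :=
  [(['J','A','N'], ['1']), (['F','E','B'], ['2']), (['M','A','R'], ['3']),
   (['A','P','R'], ['4']), (['M','A','Y'], ['5']), (['J','U','N'], ['6']),
   (['J','U','L'], ['7']), (['A','U','G'], ['8']), (['S','E','P'], ['9']),
   (['O','C','T'], ['1','0']), (['N','O','V'], ['1','1']), (['D','E','C'], ['1','2'])]

-- B's while loop: at position i try the window s[i:i+3] in the map; on a hit emit the
-- number and jump 3, otherwise emit the character and advance 1.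
def scanB (m : List (List Char × List Char)) : List Char → List Char
  | [] => []
  | c :: t =>
    match m.find? (fun p => p.1 == (c :: t).take 3) with
    | some p => p.2 ++ scanB m ((c :: t).drop 3)
    | none => c :: scanB m t
termination_by l => l.length
decreasing_by
  all_goals simp only [List.length_drop, List.length_cons]
  all_goals omega

def convert_month_abbr_py_alt (month_field : String) : String :=
  String.ofList (scanB monthPairs (PySem.Str.upper month_field).toList)

-- ===== PRECONDITION & SPEC =====
def Spec_convert_month_abbr_py (month_field : String) (out : String) : Prop := out = convert_month_abbr_py_alt month_field
instance (month_field : String) (out : String) : Decidable (Spec_convert_month_abbr_py month_field out) := by unfold Spec_convert_month_abbr_py; infer_instance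

-- ===== CLAIM (what is proved, stated in full; the proofs are below) =====
def Claim_equal_convert_month_abbr_py : Prop := ∀ (month_field : String), Dom_convert_month_abbr_py month_field → Spec_convert_month_abbr_py month_field (convert_month_abbr_py month_field)

-- ===== LEMMAS AND PROOFS =====

-- a clean structural version of Python's str.replace for a nonempty pattern
def repC (a n : List Char) : List Char → List Char
  | [] => []
  | c :: t => if a.isPrefixOf (c :: t) then n ++ repC a n (t.drop (a.length - 1)) else c :: repC a n t
termination_by l => l.length
decreasing_by
  all_goals simp only [List.length_drop, List.length_cons]
  all_goals omega

lemma repC_go_eq (a n : List Char) (ha : a ≠ []) :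
    ∀ (fuel : Nat) (l acc : List Char), l.length ≤ fuel →
      PySem.Chars.replace.go a n fuel l acc = acc.reverse ++ repC a n l := by
  have ha1 : 1 ≤ a.length := by cases a with | nil => exact absurd rfl ha | cons x xs => simp
  intro fuel
  induction fuel with
  | zero =>
    intro l acc hl
    have hnil : l = [] := by cases l <;> simp_all
    subst hnil
    simp [PySem.Chars.replace.go, repC]
  | succ fuel ih =>
    intro l acc hl
    cases l with
    | nil => simp [PySem.Chars.replace.go, repC]
    | cons c t =>
      rw [PySem.Chars.replace.go, repC]
      by_cases hp : a.isPrefixOf (c :: t)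
      · simp only [hp, if_true]
        have hlen : (List.drop a.length (c :: t)).length ≤ fuel := by
          simp only [List.length_drop, List.length_cons]
          simp only [List.length_cons] at hl
          omega
        rw [ih (List.drop a.length (c :: t)) (n.reverse ++ acc) hlen]
        have hd : List.drop a.length (c :: t) = t.drop (a.length - 1) := by
          cases a with
          | nil => exact absurd rfl ha
          | cons x xs => simp
        rw [hd]; simp
      · simp only [hp]
        have hlen : t.length ≤ fuel := by
          simp only [List.length_cons] at hl; omega
        rw [ih t (c :: acc) hlen]
        simp

lemma replace_eq_repC (a n l : List Char) (ha : a ≠ []) :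
    PySem.Chars.replace l a n = repC a n l := by
  rw [PySem.Chars.replace]
  have he : a.isEmpty = false := by cases a <;> simp_all
  rw [he]
  simp only [Bool.false_eq_true, if_false]
  rw [repC_go_eq a n ha l.length l [] le_rfl]
  simp

-- character classes (abbrev so that `decide` sees through them)
abbrev UpLetter (c : Char) : Prop := 'A' ≤ c ∧ c ≤ 'Z'
abbrev DigitCh (c : Char) : Prop := '0' ≤ c ∧ c ≤ '9'

lemma up_ne_digit {c : Char} (hu : UpLetter c) (hd : DigitCh c) : False := by
  have h : ('A' : Char) ≤ '9' := le_trans hu.1 hd.2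
  exact absurd h (by decide)

-- a letters-only prefix of a replace result was already a prefix of the source
lemma prefix_repC {a n : List Char} (hn : ∀ c ∈ n, DigitCh c) (hn0 : n ≠ []) :
    ∀ l w, (∀ c ∈ w, UpLetter c) → w <+: repC a n l → w <+: l := by
  intro l
  fun_induction repC a n l with
  | case1 =>
    intro w _ hw
    simpa using hw
  | case2 c t hp ih =>
    intro w hwL hw
    cases n with
    | nil => exact absurd rfl hn0
    | cons d n' =>
      rcases List.prefix_cons_iff.mp hw with h0 | ⟨w', rfl, _⟩
      · simp [h0]
      · exact absurd (up_ne_digit (hwL d (by simp)) (hn d (by simp))) not_false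
  | case3 c t hp ih =>
    intro w hwL hw
    rcases List.prefix_cons_iff.mp hw with h0 | ⟨w', rfl, hw'⟩
    · simp [h0]
    · have := ih w' (fun x hx => hwL x (by simp [hx])) hw'
      exact List.cons_prefix_cons.mpr ⟨rfl, this⟩

-- scanning with the empty map is the identity
lemma scanB_nil : ∀ l, scanB [] l = l := by
  intro l
  induction l with
  | nil => rw [scanB.eq_def]
  | cons c t ih =>
    rw [scanB.eq_def]
    simp only [List.find?_nil]
    exact congrArg _ ih

-- a scan skips over leading digits when every key is letters-only
lemma scanB_digits {m : List (List Char × List Char)}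
    (hm : ∀ p ∈ m, (∀ c ∈ p.1, UpLetter c) ∧ p.1 ≠ []) :
    ∀ n X, (∀ c ∈ n, DigitCh c) → scanB m (n ++ X) = n ++ scanB m X := by
  intro n
  induction n with
  | nil => intro X _; simp
  | cons d n' ih =>
    intro X hd
    have hfind : m.find? (fun p => p.1 == (d :: (n' ++ X)).take 3) = none := by
      apply List.find?_eq_none.mpr
      intro p hp hpred
      have hb : p.1 = (d :: (n' ++ X)).take 3 := by simpa using hpred
      rcases hm p hp with ⟨hL, hne⟩
      cases hq : p.1 with
      | nil => exact hne hq
      | cons e p' =>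
        rw [hq] at hb
        rw [show (3 : Nat) = 2 + 1 from rfl, List.take_succ_cons] at hb
        have : e = d := by injection hb
        subst this
        exact up_ne_digit (hL e (by simp [hq])) (hd e (by simp))
    rw [List.cons_append, scanB.eq_def]
    simp only [hfind]
    exact congrArg _ (ih X (fun c hc => hd c (by simp [hc])))

lemma repC_append_self {a : List Char} (n r : List Char) (ha : a ≠ []) :
    repC a n (a ++ r) = n ++ repC a n r := by
  cases a with
  | nil => exact absurd rfl ha
  | cons x xs =>
    rw [List.cons_append, repC]
    have hp : (x :: xs).isPrefixOf (x :: (xs ++ r)) = true :=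
      List.isPrefixOf_iff_prefix.mpr ⟨r, by simp⟩
    simp only [hp, if_true, List.length_cons, Nat.add_sub_cancel, List.drop_left]

lemma repC_cons_neg {a : List Char} (n : List Char) {c : Char} {t : List Char}
    (h : ¬ a <+: (c :: t)) : repC a n (c :: t) = c :: repC a n t := by
  rw [repC]
  have hp : a.isPrefixOf (c :: t) = false := by
    simp only [← Bool.not_eq_true, List.isPrefixOf_iff_prefix]; exact h
  simp only [hp, Bool.false_eq_true, if_false]

lemma take_three_cons (b0 b1 b2 : Char) (w : List Char) :
    (b0 :: b1 :: b2 :: w).take 3 = [b0, b1, b2] := rfl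

-- the heart: one replace pass commutes with dropping its pair from the scan map,
-- for 3-letter keys whose later keys never overlap the current one from the right
lemma scanB_cons_eq (a n : List Char) (s' : List (List Char × List Char))
    (ha3 : a.length = 3) (haL : ∀ c ∈ a, UpLetter c)
    (hnD : ∀ c ∈ n, DigitCh c) (hn0 : n ≠ [])
    (hs : ∀ p ∈ s', p.1.length = 3 ∧ (∀ c ∈ p.1, UpLetter c))
    (hO1 : ∀ p ∈ s', ¬ (p.1.getD 1 ' ' = a.getD 0 ' ' ∧ p.1.getD 2 ' ' = a.getD 1 ' '))
    (hO2 : ∀ p ∈ s', a.getD 0 ' ' ≠ p.1.getD 2 ' ') :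
    ∀ l, scanB ((a, n) :: s') l = scanB s' (repC a n l) := by
  have ha0 : a ≠ [] := by intro h; rw [h] at ha3; simp at ha3
  have hm' : ∀ p ∈ s', (∀ c ∈ p.1, UpLetter c) ∧ p.1 ≠ [] := by
    intro p hp
    refine ⟨(hs p hp).2, ?_⟩
    intro h; have := (hs p hp).1; rw [h] at this; simp at this
  suffices H : ∀ N l, l.length ≤ N → scanB ((a, n) :: s') l = scanB s' (repC a n l) by
    exact fun l => H l.length l le_rfl
  intro N
  induction N with
  | zero =>
    intro l hl
    have : l = [] := by cases l <;> simp_all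
    subst this
    rw [repC, scanB.eq_def, scanB.eq_def]
  | succ N ih =>
    intro l hl
    cases l with
    | nil => rw [repC, scanB.eq_def, scanB.eq_def]
    | cons c t =>
      by_cases hpre : a <+: (c :: t)
      · -- the head key matches here: both sides emit n and consume 3 characters
        obtain ⟨r, hr⟩ := hpre
        rw [← hr]
        rw [repC_append_self n r ha0]
        rw [scanB_digits hm' n (repC a n r) hnD]
        obtain ⟨a0, a1, a2, rfl⟩ := List.length_eq_three.mp ha3
        rw [List.cons_append, List.cons_append, List.cons_append, List.nil_append]
        rw [scanB.eq_def]
        have hfpos : (([a0, a1, a2], n) :: s').find? (fun q => q.1 == [a0, a1, a2]) =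
            some ([a0, a1, a2], n) := List.find?_cons_of_pos (by simp)
        simp only [take_three_cons, hfpos]
        have hdrop : (a0 :: a1 :: a2 :: r).drop 3 = r := rfl
        rw [hdrop]
        have hrl : r.length ≤ N := by
          have := congrArg List.length hr
          simp at this hl
          omega
        rw [ih r hrl]
      · -- the head key does not match at this position
        rw [repC_cons_neg n hpre]
        cases hfind : ((a, n) :: s').find? (fun p => p.1 == (c :: t).take 3) with
        | none =>
          have hnone' : s'.find? (fun p => p.1 == (c :: repC a n t).take 3) = none := by
            apply List.find?_eq_none.mpr
            intro p hp hpred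
            have hb : p.1 = (c :: repC a n t).take 3 := by simpa using hpred
            have hp3 := (hs p hp).1
            have hpref : p.1 <+: c :: repC a n t := by
              rw [List.prefix_iff_eq_take, hp3]; exact hb
            rcases List.prefix_cons_iff.mp hpref with h0 | ⟨w', hw, hw'⟩
            · rw [h0] at hp3; simp at hp3
            · have hwL : ∀ x ∈ w', UpLetter x := by
                intro x hx
                exact (hs p hp).2 x (by rw [hw]; simp [hx])
              have : w' <+: t := prefix_repC hnD hn0 t w' hwL hw'
              have hpt : p.1 <+: c :: t := by
                rw [hw]; exact List.cons_prefix_cons.mpr ⟨rfl, this⟩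
              have : p.1 = (c :: t).take 3 := by
                rw [← hp3]; exact List.prefix_iff_eq_take.mp hpt
              have hall := List.find?_eq_none.mp hfind p (by simp [hp])
              simp only [beq_iff_eq] at hall
              exact hall this
          rw [scanB.eq_def ((a, n) :: s')]
          simp only [hfind]
          rw [scanB.eq_def s' (c :: repC a n t)]
          simp only [hnone']
          have htl : t.length ≤ N := by simp at hl; omega
          exact congrArg _ (ih t htl)
        | some p =>
          -- the found pair lies in s' and its key is exactly the current 3-char window
          have hhead : ¬ ((a, n) : List Char × List Char).1 == (c :: t).take 3 := by
            intro h
            have : a = (c :: t).take 3 := by simpa using h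
            exact hpre (by rw [List.prefix_iff_eq_take, ha3]; exact this)
          have hfind' : s'.find? (fun p => p.1 == (c :: t).take 3) = some p := by
            rw [List.find?_cons_of_neg (by simpa using hhead)] at hfind
            exact hfind
          have hpmem : p ∈ s' := List.mem_of_find?_eq_some hfind'
          have hb : p.1 = (c :: t).take 3 := by
            have := List.find?_some hfind'
            simpa using this
          have hp3 := (hs p hpmem).1
          obtain ⟨b0, b1, b2, hb3⟩ := List.length_eq_three.mp hp3
          have hpref : p.1 <+: c :: t := by rw [List.prefix_iff_eq_take, hp3]; exact hb
          obtain ⟨r, hr⟩ := hpref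
          rw [hb3] at hr
          have hc : c = b0 := by injection hr.symm
          have ht : t = b1 :: b2 :: r := by
            have := hr
            simp only [List.cons_append, List.nil_append] at this
            injection this with _ h2
            exact h2.symm
          subst hc; subst ht
          obtain ⟨a0, a1, a2, ha'⟩ := List.length_eq_three.mp ha3
          -- the processed key cannot match at offset 1 (no key's 2-suffix is a key's 2-prefix)
          have hna1 : ¬ a <+: (b1 :: b2 :: r) := by
            intro hcon
            rw [ha'] at hcon
            rcases List.cons_prefix_cons.mp hcon with ⟨e1, h1⟩
            rcases List.cons_prefix_cons.mp h1 with ⟨e2, _⟩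
            exact hO1 p hpmem (by rw [hb3, ha']; simp [e1.symm, e2.symm])
          -- nor at offset 2 (no later key ends with the processed key's first letter)
          have hna2 : ¬ a <+: (b2 :: r) := by
            intro hcon
            rw [ha'] at hcon
            rcases List.cons_prefix_cons.mp hcon with ⟨e1, _⟩
            exact hO2 p hpmem (by rw [hb3, ha']; simp [e1.symm])
          rw [repC_cons_neg n hna1, repC_cons_neg n hna2]
          simp only [take_three_cons] at hfind hfind'
          rw [scanB.eq_def ((a, n) :: s'), scanB.eq_def s' (c :: b1 :: b2 :: repC a n r)]
          simp only [take_three_cons, hfind, hfind']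
          have hdrop1 : (c :: b1 :: b2 :: r).drop 3 = r := rfl
          have hdrop2 : (c :: b1 :: b2 :: repC a n r).drop 3 = repC a n r := rfl
          rw [hdrop1, hdrop2]
          have hrl : r.length ≤ N := by simp at hl; omega
          rw [ih r hrl]

-- finite facts about the literal month map, checked by the kernel
lemma monthPairs_facts : ∀ p ∈ monthPairs,
    p.1.length = 3 ∧ (∀ c ∈ p.1, UpLetter c) ∧ (∀ c ∈ p.2, DigitCh c) ∧ p.2 ≠ [] := by
  intro p hp
  fin_cases hp <;>
    exact ⟨rfl, by intro c hc; fin_cases hc <;> decide,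
           by intro c hc; fin_cases hc <;> decide, by simp⟩

lemma monthPairs_noOverlap1 : ∀ p ∈ monthPairs, ∀ q ∈ monthPairs,
    ¬ (q.1.getD 1 ' ' = p.1.getD 0 ' ' ∧ q.1.getD 2 ' ' = p.1.getD 1 ' ') := by
  intro p hp q hq
  fin_cases hp <;> fin_cases hq <;> decide

lemma monthPairs_noOverlap2 :
    List.Pairwise (fun p q => p.1.getD 0 ' ' ≠ q.1.getD 2 ' ') monthPairs := by
  rw [List.pairwise_iff_getElem]
  intro i j hi hj hij
  have hj' : j < 12 := by simpa [monthPairs] using hj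
  have hi' : i < 12 := by simpa [monthPairs] using hi
  interval_cases j <;> interval_cases i <;> simp [monthPairs]

-- folding the replace passes over any suffix of the map equals scanning with that suffix
lemma foldl_repC_eq_scanB :
    ∀ (s done : List (List Char × List Char)), monthPairs = done ++ s →
      ∀ l, s.foldl (fun r p => repC p.1 p.2 r) l = scanB s l := by
  intro s
  induction s with
  | nil => intro done h l; rw [List.foldl_nil, scanB_nil]
  | cons p s' ih =>
    intro done h l
    obtain ⟨a, nn⟩ := p
    rw [List.foldl_cons]
    rw [ih (done ++ [(a, nn)]) (by rw [h, List.append_cons])]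
    have hmem : ∀ q ∈ (a, nn) :: s', q ∈ monthPairs := by
      rw [h]; intro q hq; exact List.mem_append_right _ hq
    have hAn := monthPairs_facts (a, nn) (hmem _ (by simp))
    have hpw : List.Pairwise (fun p q => p.1.getD 0 ' ' ≠ q.1.getD 2 ' ') ((a, nn) :: s') :=
      monthPairs_noOverlap2.sublist (h ▸ List.sublist_append_right done _)
    exact (scanB_cons_eq a nn s' hAn.1 hAn.2.1 hAn.2.2.1 hAn.2.2.2
      (fun q hq => ⟨(monthPairs_facts q (hmem q (by simp [hq]))).1,
                    (monthPairs_facts q (hmem q (by simp [hq]))).2.1⟩)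
      (fun q hq => monthPairs_noOverlap1 (a, nn) (hmem _ (by simp)) q (hmem q (by simp [hq])))
      (fun q hq => (List.pairwise_cons.mp hpw).1 q hq)
      l).symm

-- A's string-level fold, moved to the character-list level
lemma toList_foldl_replace :
    ∀ (L : List (String × String)) (s : String),
      (L.foldl (fun r p => PySem.Str.replace r p.1 p.2) s).toList =
        (L.map (fun p => (p.1.toList, p.2.toList))).foldl
          (fun r q => PySem.Chars.replace r q.1 q.2) s.toList := by
  intro L
  induction L with
  | nil => intro s; simp
  | cons p L' ih =>
    intro s
    rw [List.foldl_cons, List.map_cons, List.foldl_cons, ih, PySem.Str.toList_replace]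

lemma monthMapA_toList : monthMapA.map (fun p => (p.1.toList, p.2.toList)) = monthPairs := by decide

-- ===== VERDICT (by name: the statement is the Claim_ definition above) =====
theorem convert_month_abbr_py_spec : Claim_equal_convert_month_abbr_py := by
  intro month_field _
  unfold Spec_convert_month_abbr_py convert_month_abbr_py convert_month_abbr_py_alt
  have h1 : (monthMapA.foldl (fun result p => PySem.Str.replace result p.1 p.2)
      (PySem.Str.upper month_field)).toList
      = scanB monthPairs (PySem.Str.upper month_field).toList := by
    rw [toList_foldl_replace, monthMapA_toList]
    rw [PySem.List.foldl_congr_mem monthPairs _ (fun r q => repC q.1 q.2 r) _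
      (fun acc q hq => replace_eq_repC q.1 q.2 acc (by
        intro h0
        have := (monthPairs_facts q hq).1
        rw [h0] at this; simp at this))]
    exact foldl_repC_eq_scanB monthPairs [] rfl _
  have h2 := congrArg String.ofList h1
  rwa [String.ofList_toList] at h2
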